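-- pv_equiv track=rewrite | github.com/d-quintal/homelog | openweather.py | visibility_to_string
-- ===== SOURCE A (Python) =====
-- DISTANCE_STRINGS = [
--     {'desc': 'practically nothing', 'min': 0, 'max': 125},
--     {'desc': '250 ft', 'min': 125, 'max': 375},
--     {'desc': '500 ft', 'min': 375, 'max': 875},
--     {'desc': '750 ft', 'min': 875, 'max': 1000},
--     {'desc': '1/4 mile', 'min': 1000, 'max': 1980},
--     {'desc': '1/2 mile', 'min': 1980, 'max': 3300},
--     {'desc': '3/4 mile', 'min': 3300, 'max': 4620},
--     {'desc': '1 mile', 'min': 4620, 'max': 6600},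
--     {'desc': '1.5 miles', 'min': 6600, 'max': 9900},
--     {'desc': (lambda x : str(round(x / 5280)) + ' miles'), 'min': 9900, 'max': 999999}
-- ]
--
-- def visibility_to_string(feet):
--     for distance in DISTANCE_STRINGS:
--         if distance['min'] <= feet < distance['max']:
--             if callable(distance['desc']):
--                 return distance['desc'](feet)
--             else:
--                 return distance['desc']
--     return 'unclear at this time'
-- ===== SOURCE B (Python) =====
-- _STARTS = [0, 125, 375, 875, 1000, 1980, 3300, 4620, 6600, 9900]
-- _DESCS = ['practically nothing', '250 ft', '500 ft', '750 ft', '1/4 mile',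
--           '1/2 mile', '3/4 mile', '1 mile', '1.5 miles']
--
--
-- def _miles(feet):
--     # round(feet/5280) computed exactly in integers (round-half-to-even)
--     q, r = divmod(feet, 5280)
--     if 2 * r > 5280 or (2 * r == 5280 and q % 2 == 1):
--         q += 1
--     return str(q) + ' miles'
--
--
-- def visibility_to_string(feet):
--     if feet < 0 or feet >= 999999:
--         return 'unclear at this time'
--     # binary search (bisect_right) over the sorted lower bounds
--     lo, hi = 0, len(_STARTS)
--     while lo < hi:
--         mid = (lo + hi) // 2
--         if _STARTS[mid] <= feet:
--             lo = mid + 1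
--         else:
--             hi = mid
--     idx = lo - 1
--     if idx == len(_DESCS):
--         return _miles(feet)
--     return _DESCS[idx]
-- ===== Notes on version B (the rewrite author's own statement) =====
-- stated objective: alternative
-- what changed: Replaces the linear scan over interval dicts with a range guard plus a hand-written binary search (bisect_right) on the sorted lower bounds into a parallel description table; the top bucket's round(feet/5280) is computed in exact integer arithmetic (round-half-to-even) instead of float round.
import Mathlib
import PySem

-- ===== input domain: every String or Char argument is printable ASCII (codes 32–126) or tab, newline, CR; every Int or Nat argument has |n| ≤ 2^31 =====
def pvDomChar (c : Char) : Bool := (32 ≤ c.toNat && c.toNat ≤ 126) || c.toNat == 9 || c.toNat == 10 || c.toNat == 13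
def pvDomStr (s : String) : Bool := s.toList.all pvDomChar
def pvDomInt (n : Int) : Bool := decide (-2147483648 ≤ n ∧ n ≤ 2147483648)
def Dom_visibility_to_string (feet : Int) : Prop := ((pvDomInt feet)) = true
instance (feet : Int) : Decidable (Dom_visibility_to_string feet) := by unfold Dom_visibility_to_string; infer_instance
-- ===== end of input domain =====

-- B replaces A's linear scan over interval records by a range guard plus a hand-written
-- binary search over the sorted lower bounds into a parallel description table (alternative decomposition).


-- ===== PORT A =====
-- The top bucket's desc is the lambda `str(round(x/5280)) + ' miles'`; Python's float `round`
-- is ported as exact rational round-half-to-even (they agree exactly for 0 ≤ x < 999999,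
-- the only inputs the lambda is reached on: the quotient is < 190, so the float division is
-- accurate enough that ties occur exactly at exactly-representable half-integers).
def pyRoundDiv5280A (x : Int) : Int :=
  let q := PySem.Int.floordiv x 5280
  let r := x - q * 5280
  if 2 * r > 5280 ∨ (2 * r = 5280 ∧ PySem.Int.mod q 2 = 1) then q + 1 else q

-- DISTANCE_STRINGS: `none` stands for the callable desc (the lambda above)
def distanceStringsA : List (Option String × Int × Int) :=
  [(some "practically nothing", 0, 125),
   (some "250 ft", 125, 375),
   (some "500 ft", 375, 875),
   (some "750 ft", 875, 1000),
   (some "1/4 mile", 1000, 1980),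
   (some "1/2 mile", 1980, 3300),
   (some "3/4 mile", 3300, 4620),
   (some "1 mile", 4620, 6600),
   (some "1.5 miles", 6600, 9900),
   (none, 9900, 999999)]

def vtsLoopA : List (Option String × Int × Int) → Int → String
  | [], _ => "unclear at this time"
  | (desc, mn, mx) :: rest, feet =>
    if mn ≤ feet ∧ feet < mx then
      match desc with
      | some s => s
      | none => PySem.Int.toStr (pyRoundDiv5280A feet) ++ " miles"
    else vtsLoopA rest feet

def visibility_to_string (feet : Int) : String := vtsLoopA distanceStringsA feet

-- ===== PORT B =====
def startsB : List Int := [0, 125, 375, 875, 1000, 1980, 3300, 4620, 6600, 9900]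

def descsB : List String :=
  ["practically nothing", "250 ft", "500 ft", "750 ft", "1/4 mile",
   "1/2 mile", "3/4 mile", "1 mile", "1.5 miles"]

-- `divmod(feet, 5280)` then the half-to-even correction, as in Source B's _miles
def milesB (feet : Int) : String :=
  let q := PySem.Int.floordiv feet 5280
  let r := PySem.Int.mod feet 5280
  let q := if 2 * r > 5280 ∨ (2 * r = 5280 ∧ PySem.Int.mod q 2 = 1) then q + 1 else q
  PySem.Int.toStr q ++ " miles"

-- the hand-written `while lo < hi` binary search of Source B; the extra `fuel` argument only
-- bounds the iteration count (hi - lo shrinks each round, so fuel = initial hi suffices)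
def bisectLoopB (feet : Int) : Nat → Nat → Nat → Nat
  | 0, lo, _ => lo
  | fuel + 1, lo, hi =>
    if lo < hi then
      let mid := (lo + hi) / 2
      if (startsB.getD mid 0) ≤ feet then bisectLoopB feet fuel (mid + 1) hi
      else bisectLoopB feet fuel lo mid
    else lo

def visibility_to_string_alt (feet : Int) : String :=
  if feet < 0 ∨ feet ≥ 999999 then "unclear at this time"
  else
    let idx := bisectLoopB feet startsB.length 0 startsB.length - 1
    if idx = descsB.length then milesB feet
    else descsB.getD idx ""

-- ===== PRECONDITION & SPEC =====
def Spec_visibility_to_string (feet : Int) (out : String) : Prop := out = visibility_to_string_alt feet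
instance (feet : Int) (out : String) : Decidable (Spec_visibility_to_string feet out) := by unfold Spec_visibility_to_string; infer_instance

-- ===== CLAIM (what is proved, stated in full; the proofs are below) =====
def Claim_equal_visibility_to_string : Prop := ∀ (feet : Int), Dom_visibility_to_string feet → Spec_visibility_to_string feet (visibility_to_string feet)

-- ===== LEMMAS AND PROOFS =====

-- ===== VERDICT (by name: the statement is the Claim_ definition above) =====
theorem visibility_to_string_spec : Claim_equal_visibility_to_string := by
  intro feet _
  unfold Spec_visibility_to_string
  by_cases h0 : feet < 0
  · -- region case
      simp [visibility_to_string, vtsLoopA, distanceStringsA, visibility_to_string_alt,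
        bisectLoopB, startsB, descsB, milesB, pyRoundDiv5280A, List.getD,
        show ¬ ((0:Int) ≤ feet) by omega,
        show feet < (0:Int) by omega,
        show ¬ ((125:Int) ≤ feet) by omega,
        show feet < (125:Int) by omega,
        show ¬ ((375:Int) ≤ feet) by omega,
        show feet < (375:Int) by omega,
        show ¬ ((875:Int) ≤ feet) by omega,
        show feet < (875:Int) by omega,
        show ¬ ((1000:Int) ≤ feet) by omega,
        show feet < (1000:Int) by omega,
        show ¬ ((1980:Int) ≤ feet) by omega,
        show feet < (1980:Int) by omega,
        show ¬ ((3300:Int) ≤ feet) by omega,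
        show feet < (3300:Int) by omega,
        show ¬ ((4620:Int) ≤ feet) by omega,
        show feet < (4620:Int) by omega,
        show ¬ ((6600:Int) ≤ feet) by omega,
        show feet < (6600:Int) by omega,
        show ¬ ((9900:Int) ≤ feet) by omega,
        show feet < (9900:Int) by omega,
        show ¬ ((999999:Int) ≤ feet) by omega,
        show feet < (999999:Int) by omega,
        show (feet < 0 ∨ feet ≥ 999999) by omega]
  by_cases h1 : feet < 125
  · -- region case
      simp [visibility_to_string, vtsLoopA, distanceStringsA, visibility_to_string_alt,
        bisectLoopB, startsB, descsB, milesB, pyRoundDiv5280A, List.getD,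
        show (0:Int) ≤ feet by omega,
        show ¬ (feet < (0:Int)) by omega,
        show ¬ ((125:Int) ≤ feet) by omega,
        show feet < (125:Int) by omega,
        show ¬ ((375:Int) ≤ feet) by omega,
        show feet < (375:Int) by omega,
        show ¬ ((875:Int) ≤ feet) by omega,
        show feet < (875:Int) by omega,
        show ¬ ((1000:Int) ≤ feet) by omega,
        show feet < (1000:Int) by omega,
        show ¬ ((1980:Int) ≤ feet) by omega,
        show feet < (1980:Int) by omega,
        show ¬ ((3300:Int) ≤ feet) by omega,
        show feet < (3300:Int) by omega,
        show ¬ ((4620:Int) ≤ feet) by omega,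
        show feet < (4620:Int) by omega,
        show ¬ ((6600:Int) ≤ feet) by omega,
        show feet < (6600:Int) by omega,
        show ¬ ((9900:Int) ≤ feet) by omega,
        show feet < (9900:Int) by omega,
        show ¬ ((999999:Int) ≤ feet) by omega,
        show feet < (999999:Int) by omega,
        show ¬ (feet < 0 ∨ feet ≥ 999999) by omega]
  by_cases h2 : feet < 375
  · -- region case
      simp [visibility_to_string, vtsLoopA, distanceStringsA, visibility_to_string_alt,
        bisectLoopB, startsB, descsB, milesB, pyRoundDiv5280A, List.getD,
        show (0:Int) ≤ feet by omega,
        show ¬ (feet < (0:Int)) by omega,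
        show (125:Int) ≤ feet by omega,
        show ¬ (feet < (125:Int)) by omega,
        show ¬ ((375:Int) ≤ feet) by omega,
        show feet < (375:Int) by omega,
        show ¬ ((875:Int) ≤ feet) by omega,
        show feet < (875:Int) by omega,
        show ¬ ((1000:Int) ≤ feet) by omega,
        show feet < (1000:Int) by omega,
        show ¬ ((1980:Int) ≤ feet) by omega,
        show feet < (1980:Int) by omega,
        show ¬ ((3300:Int) ≤ feet) by omega,
        show feet < (3300:Int) by omega,
        show ¬ ((4620:Int) ≤ feet) by omega,
        show feet < (4620:Int) by omega,
        show ¬ ((6600:Int) ≤ feet) by omega,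
        show feet < (6600:Int) by omega,
        show ¬ ((9900:Int) ≤ feet) by omega,
        show feet < (9900:Int) by omega,
        show ¬ ((999999:Int) ≤ feet) by omega,
        show feet < (999999:Int) by omega,
        show ¬ (feet < 0 ∨ feet ≥ 999999) by omega]
  by_cases h3 : feet < 875
  · -- region case
      simp [visibility_to_string, vtsLoopA, distanceStringsA, visibility_to_string_alt,
        bisectLoopB, startsB, descsB, milesB, pyRoundDiv5280A, List.getD,
        show (0:Int) ≤ feet by omega,
        show ¬ (feet < (0:Int)) by omega,
        show (125:Int) ≤ feet by omega,
        show ¬ (feet < (125:Int)) by omega,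
        show (375:Int) ≤ feet by omega,
        show ¬ (feet < (375:Int)) by omega,
        show ¬ ((875:Int) ≤ feet) by omega,
        show feet < (875:Int) by omega,
        show ¬ ((1000:Int) ≤ feet) by omega,
        show feet < (1000:Int) by omega,
        show ¬ ((1980:Int) ≤ feet) by omega,
        show feet < (1980:Int) by omega,
        show ¬ ((3300:Int) ≤ feet) by omega,
        show feet < (3300:Int) by omega,
        show ¬ ((4620:Int) ≤ feet) by omega,
        show feet < (4620:Int) by omega,
        show ¬ ((6600:Int) ≤ feet) by omega,
        show feet < (6600:Int) by omega,
        show ¬ ((9900:Int) ≤ feet) by omega,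
        show feet < (9900:Int) by omega,
        show ¬ ((999999:Int) ≤ feet) by omega,
        show feet < (999999:Int) by omega,
        show ¬ (feet < 0 ∨ feet ≥ 999999) by omega]
  by_cases h4 : feet < 1000
  · -- region case
      simp [visibility_to_string, vtsLoopA, distanceStringsA, visibility_to_string_alt,
        bisectLoopB, startsB, descsB, milesB, pyRoundDiv5280A, List.getD,
        show (0:Int) ≤ feet by omega,
        show ¬ (feet < (0:Int)) by omega,
        show (125:Int) ≤ feet by omega,
        show ¬ (feet < (125:Int)) by omega,
        show (375:Int) ≤ feet by omega,
        show ¬ (feet < (375:Int)) by omega,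
        show (875:Int) ≤ feet by omega,
        show ¬ (feet < (875:Int)) by omega,
        show ¬ ((1000:Int) ≤ feet) by omega,
        show feet < (1000:Int) by omega,
        show ¬ ((1980:Int) ≤ feet) by omega,
        show feet < (1980:Int) by omega,
        show ¬ ((3300:Int) ≤ feet) by omega,
        show feet < (3300:Int) by omega,
        show ¬ ((4620:Int) ≤ feet) by omega,
        show feet < (4620:Int) by omega,
        show ¬ ((6600:Int) ≤ feet) by omega,
        show feet < (6600:Int) by omega,
        show ¬ ((9900:Int) ≤ feet) by omega,
        show feet < (9900:Int) by omega,
        show ¬ ((999999:Int) ≤ feet) by omega,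
        show feet < (999999:Int) by omega,
        show ¬ (feet < 0 ∨ feet ≥ 999999) by omega]
  by_cases h5 : feet < 1980
  · -- region case
      simp [visibility_to_string, vtsLoopA, distanceStringsA, visibility_to_string_alt,
        bisectLoopB, startsB, descsB, milesB, pyRoundDiv5280A, List.getD,
        show (0:Int) ≤ feet by omega,
        show ¬ (feet < (0:Int)) by omega,
        show (125:Int) ≤ feet by omega,
        show ¬ (feet < (125:Int)) by omega,
        show (375:Int) ≤ feet by omega,
        show ¬ (feet < (375:Int)) by omega,
        show (875:Int) ≤ feet by omega,
        show ¬ (feet < (875:Int)) by omega,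
        show (1000:Int) ≤ feet by omega,
        show ¬ (feet < (1000:Int)) by omega,
        show ¬ ((1980:Int) ≤ feet) by omega,
        show feet < (1980:Int) by omega,
        show ¬ ((3300:Int) ≤ feet) by omega,
        show feet < (3300:Int) by omega,
        show ¬ ((4620:Int) ≤ feet) by omega,
        show feet < (4620:Int) by omega,
        show ¬ ((6600:Int) ≤ feet) by omega,
        show feet < (6600:Int) by omega,
        show ¬ ((9900:Int) ≤ feet) by omega,
        show feet < (9900:Int) by omega,
        show ¬ ((999999:Int) ≤ feet) by omega,
        show feet < (999999:Int) by omega,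
        show ¬ (feet < 0 ∨ feet ≥ 999999) by omega]
  by_cases h6 : feet < 3300
  · -- region case
      simp [visibility_to_string, vtsLoopA, distanceStringsA, visibility_to_string_alt,
        bisectLoopB, startsB, descsB, milesB, pyRoundDiv5280A, List.getD,
        show (0:Int) ≤ feet by omega,
        show ¬ (feet < (0:Int)) by omega,
        show (125:Int) ≤ feet by omega,
        show ¬ (feet < (125:Int)) by omega,
        show (375:Int) ≤ feet by omega,
        show ¬ (feet < (375:Int)) by omega,
        show (875:Int) ≤ feet by omega,
        show ¬ (feet < (875:Int)) by omega,
        show (1000:Int) ≤ feet by omega,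
        show ¬ (feet < (1000:Int)) by omega,
        show (1980:Int) ≤ feet by omega,
        show ¬ (feet < (1980:Int)) by omega,
        show ¬ ((3300:Int) ≤ feet) by omega,
        show feet < (3300:Int) by omega,
        show ¬ ((4620:Int) ≤ feet) by omega,
        show feet < (4620:Int) by omega,
        show ¬ ((6600:Int) ≤ feet) by omega,
        show feet < (6600:Int) by omega,
        show ¬ ((9900:Int) ≤ feet) by omega,
        show feet < (9900:Int) by omega,
        show ¬ ((999999:Int) ≤ feet) by omega,
        show feet < (999999:Int) by omega,
        show ¬ (feet < 0 ∨ feet ≥ 999999) by omega]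
  by_cases h7 : feet < 4620
  · -- region case
      simp [visibility_to_string, vtsLoopA, distanceStringsA, visibility_to_string_alt,
        bisectLoopB, startsB, descsB, milesB, pyRoundDiv5280A, List.getD,
        show (0:Int) ≤ feet by omega,
        show ¬ (feet < (0:Int)) by omega,
        show (125:Int) ≤ feet by omega,
        show ¬ (feet < (125:Int)) by omega,
        show (375:Int) ≤ feet by omega,
        show ¬ (feet < (375:Int)) by omega,
        show (875:Int) ≤ feet by omega,
        show ¬ (feet < (875:Int)) by omega,
        show (1000:Int) ≤ feet by omega,
        show ¬ (feet < (1000:Int)) by omega,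
        show (1980:Int) ≤ feet by omega,
        show ¬ (feet < (1980:Int)) by omega,
        show (3300:Int) ≤ feet by omega,
        show ¬ (feet < (3300:Int)) by omega,
        show ¬ ((4620:Int) ≤ feet) by omega,
        show feet < (4620:Int) by omega,
        show ¬ ((6600:Int) ≤ feet) by omega,
        show feet < (6600:Int) by omega,
        show ¬ ((9900:Int) ≤ feet) by omega,
        show feet < (9900:Int) by omega,
        show ¬ ((999999:Int) ≤ feet) by omega,
        show feet < (999999:Int) by omega,
        show ¬ (feet < 0 ∨ feet ≥ 999999) by omega]
  by_cases h8 : feet < 6600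
  · -- region case
      simp [visibility_to_string, vtsLoopA, distanceStringsA, visibility_to_string_alt,
        bisectLoopB, startsB, descsB, milesB, pyRoundDiv5280A, List.getD,
        show (0:Int) ≤ feet by omega,
        show ¬ (feet < (0:Int)) by omega,
        show (125:Int) ≤ feet by omega,
        show ¬ (feet < (125:Int)) by omega,
        show (375:Int) ≤ feet by omega,
        show ¬ (feet < (375:Int)) by omega,
        show (875:Int) ≤ feet by omega,
        show ¬ (feet < (875:Int)) by omega,
        show (1000:Int) ≤ feet by omega,
        show ¬ (feet < (1000:Int)) by omega,
        show (1980:Int) ≤ feet by omega,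
        show ¬ (feet < (1980:Int)) by omega,
        show (3300:Int) ≤ feet by omega,
        show ¬ (feet < (3300:Int)) by omega,
        show (4620:Int) ≤ feet by omega,
        show ¬ (feet < (4620:Int)) by omega,
        show ¬ ((6600:Int) ≤ feet) by omega,
        show feet < (6600:Int) by omega,
        show ¬ ((9900:Int) ≤ feet) by omega,
        show feet < (9900:Int) by omega,
        show ¬ ((999999:Int) ≤ feet) by omega,
        show feet < (999999:Int) by omega,
        show ¬ (feet < 0 ∨ feet ≥ 999999) by omega]
  by_cases h9 : feet < 9900
  · -- region case
      simp [visibility_to_string, vtsLoopA, distanceStringsA, visibility_to_string_alt,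
        bisectLoopB, startsB, descsB, milesB, pyRoundDiv5280A, List.getD,
        show (0:Int) ≤ feet by omega,
        show ¬ (feet < (0:Int)) by omega,
        show (125:Int) ≤ feet by omega,
        show ¬ (feet < (125:Int)) by omega,
        show (375:Int) ≤ feet by omega,
        show ¬ (feet < (375:Int)) by omega,
        show (875:Int) ≤ feet by omega,
        show ¬ (feet < (875:Int)) by omega,
        show (1000:Int) ≤ feet by omega,
        show ¬ (feet < (1000:Int)) by omega,
        show (1980:Int) ≤ feet by omega,
        show ¬ (feet < (1980:Int)) by omega,
        show (3300:Int) ≤ feet by omega,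
        show ¬ (feet < (3300:Int)) by omega,
        show (4620:Int) ≤ feet by omega,
        show ¬ (feet < (4620:Int)) by omega,
        show (6600:Int) ≤ feet by omega,
        show ¬ (feet < (6600:Int)) by omega,
        show ¬ ((9900:Int) ≤ feet) by omega,
        show feet < (9900:Int) by omega,
        show ¬ ((999999:Int) ≤ feet) by omega,
        show feet < (999999:Int) by omega,
        show ¬ (feet < 0 ∨ feet ≥ 999999) by omega]
  by_cases h10 : feet < 999999
  · -- region case
      have hm : PySem.Int.mod feet 5280 = feet - PySem.Int.floordiv feet 5280 * 5280 := by
        linarith [PySem.Int.floordiv_mul_add_mod feet 5280]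
      have he : feet % 5280 = feet - feet / 5280 * 5280 := by
        rw [Int.emod_def]; ring
      simp [he, visibility_to_string, vtsLoopA, distanceStringsA, visibility_to_string_alt,
        bisectLoopB, startsB, descsB, milesB, pyRoundDiv5280A, List.getD,
        hm,
        show (0:Int) ≤ feet by omega,
        show ¬ (feet < (0:Int)) by omega,
        show (125:Int) ≤ feet by omega,
        show ¬ (feet < (125:Int)) by omega,
        show (375:Int) ≤ feet by omega,
        show ¬ (feet < (375:Int)) by omega,
        show (875:Int) ≤ feet by omega,
        show ¬ (feet < (875:Int)) by omega,
        show (1000:Int) ≤ feet by omega,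
        show ¬ (feet < (1000:Int)) by omega,
        show (1980:Int) ≤ feet by omega,
        show ¬ (feet < (1980:Int)) by omega,
        show (3300:Int) ≤ feet by omega,
        show ¬ (feet < (3300:Int)) by omega,
        show (4620:Int) ≤ feet by omega,
        show ¬ (feet < (4620:Int)) by omega,
        show (6600:Int) ≤ feet by omega,
        show ¬ (feet < (6600:Int)) by omega,
        show (9900:Int) ≤ feet by omega,
        show ¬ (feet < (9900:Int)) by omega,
        show ¬ ((999999:Int) ≤ feet) by omega,
        show feet < (999999:Int) by omega,
        show ¬ (feet < 0 ∨ feet ≥ 999999) by omega]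
  -- feet ≥ 999999
  simp [visibility_to_string, vtsLoopA, distanceStringsA, visibility_to_string_alt,
      bisectLoopB, startsB, descsB, milesB, pyRoundDiv5280A, List.getD,
      show (0:Int) ≤ feet by omega,
      show ¬ (feet < (0:Int)) by omega,
      show (125:Int) ≤ feet by omega,
      show ¬ (feet < (125:Int)) by omega,
      show (375:Int) ≤ feet by omega,
      show ¬ (feet < (375:Int)) by omega,
      show (875:Int) ≤ feet by omega,
      show ¬ (feet < (875:Int)) by omega,
      show (1000:Int) ≤ feet by omega,
      show ¬ (feet < (1000:Int)) by omega,
      show (1980:Int) ≤ feet by omega,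
      show ¬ (feet < (1980:Int)) by omega,
      show (3300:Int) ≤ feet by omega,
      show ¬ (feet < (3300:Int)) by omega,
      show (4620:Int) ≤ feet by omega,
      show ¬ (feet < (4620:Int)) by omega,
      show (6600:Int) ≤ feet by omega,
      show ¬ (feet < (6600:Int)) by omega,
      show (9900:Int) ≤ feet by omega,
      show ¬ (feet < (9900:Int)) by omega,
      show (999999:Int) ≤ feet by omega,
      show ¬ (feet < (999999:Int)) by omega,
      show (feet < 0 ∨ feet ≥ 999999) by omega]
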